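-- pv_equiv track=rewrite | github.com/TheMiles/srd_tools | extract_from_srd.py | findColumnGap
-- ===== SOURCE A (Python) =====
-- def findColumnGap( page ):
--
--     for divider in range(55, 70):
--
--         s = set()
--
--         for l in page:
--
--             if len( l ) <= divider: continue
--
--             s.add( l[ divider ] )
--
--         if len( s ) == 1 and  ' ' in s:
--
--             return divider
--
--     return -1
-- ===== SOURCE B (Python) =====
-- def findColumnGap(page):
--     # One pass over the lines, maintaining per-column (col, reached, allspace)
--     # accumulators for the candidate dividers; then scan the columns in order.
--     state = [(col, False, True) for col in range(55, 70)]
--     for l in page: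
--         state = [(col,
--                   reached or col < len(l),
--                   allspace and not (col < len(l) and l[col] != ' '))
--                  for (col, reached, allspace) in state]
--     for (col, reached, allspace) in state:
--         if reached and allspace:
--             return col
--     return -1
-- ===== Notes on version B (the rewrite author's own statement) =====
-- stated objective: alternative
-- what changed: Reverses the loop nesting: instead of rebuilding a character set per divider (15 scans over the lines), B makes one pass over the lines maintaining per-column (reached, allspace) accumulators and then scans the 15 columns in order.
import Mathlib
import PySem

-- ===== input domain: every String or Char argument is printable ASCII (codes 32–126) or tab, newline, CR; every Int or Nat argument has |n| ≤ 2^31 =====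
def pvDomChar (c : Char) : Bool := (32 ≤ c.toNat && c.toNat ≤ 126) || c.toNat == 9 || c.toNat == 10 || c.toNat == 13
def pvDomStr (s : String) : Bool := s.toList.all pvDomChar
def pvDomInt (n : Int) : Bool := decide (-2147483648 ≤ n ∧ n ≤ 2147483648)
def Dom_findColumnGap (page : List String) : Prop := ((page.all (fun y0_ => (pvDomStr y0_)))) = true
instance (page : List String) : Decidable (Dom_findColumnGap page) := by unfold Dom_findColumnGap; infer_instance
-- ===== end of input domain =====

-- B changes the decomposition: a single pass building per-column (reached, allspace)
-- accumulators, then a scan of the columns — instead of rebuilding a character set per divider.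

-- ===== PORT A =====
-- inner loop: build the set of characters at column d over all long-enough lines
def pvAInner (page : List String) (d : Int) : PySem.Set Char :=
  page.foldl (fun s l =>
    if PySem.Str.len l ≤ d then s
    else match PySem.Str.pyGet? l d with    -- guarded by d < len(l), so always `some`
      | some c => PySem.Set.add s c
      | none => s) PySem.Set.empty

-- outer loop with early return over the dividers
def pvAGo (page : List String) : List Int → Int
  | [] => -1
  | d :: ds =>
    let s := pvAInner page d
    if PySem.Set.len s = 1 ∧ PySem.Set.contains s ' ' then d else pvAGo page ds

def findColumnGap (page : List String) : Int :=
  pvAGo page (PySem.List.pyRange 55 70 1)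

-- ===== PORT B =====
def pvBStep (l : String) (e : Int × Bool × Bool) : Int × Bool × Bool :=
  (e.1,
   e.2.1 || decide (e.1 < PySem.Str.len l),
   e.2.2 && !(decide (e.1 < PySem.Str.len l) && decide (PySem.Str.pyGet? l e.1 ≠ some ' ')))

def pvBScan : List (Int × Bool × Bool) → Int
  | [] => -1
  | e :: rest => if e.2.1 && e.2.2 then e.1 else pvBScan rest

def findColumnGap_alt (page : List String) : Int :=
  let init := (PySem.List.pyRange 55 70 1).map (fun col => (col, false, true))
  pvBScan (page.foldl (fun st l => st.map (pvBStep l)) init)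

-- ===== PRECONDITION & SPEC =====
def Spec_findColumnGap (page : List String) (out : Int) : Prop := out = findColumnGap_alt page
instance (page : List String) (out : Int) : Decidable (Spec_findColumnGap page out) := by unfold Spec_findColumnGap; infer_instance

-- ===== CLAIM (what is proved, stated in full; the proofs are below) =====
def Claim_equal_findColumnGap : Prop := ∀ (page : List String), Dom_findColumnGap page → Spec_findColumnGap page (findColumnGap page)

-- ===== LEMMAS AND PROOFS =====

theorem pv_get (l : String) (d : Int) (hd : 0 ≤ d) (hlen : d.toNat < l.toList.length) :
    PySem.Str.pyGet? l d = some l.toList[d.toNat] := by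
  have h3 : l.toList.length = l.length := String.length_toList
  have h4 : d < (l.length : Int) := by omega
  rw [PySem.Str.pyGet?_eq, PySem.Chars.pyGet?_eq_listPyGet?]
  simp [PySem.List.pyGet?, PySem.List.pyIdx?, hd, h4]

-- the fold over lines of a map over columns is the map of per-column folds
theorem pv_fold_map (page : List String) :
    ∀ (init : List (Int × Bool × Bool)),
      page.foldl (fun st l => st.map (pvBStep l)) init
        = init.map (fun e => page.foldl (fun e l => pvBStep l e) e) := by
  induction page with
  | nil => intro init; simp
  | cons l page ih =>
    intro init
    simp [List.foldl_cons, ih, List.map_map, Function.comp_def]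

-- per-column invariant: B's pair fold tracks A's set fold
set_option maxRecDepth 4096 in
theorem pv_col_inv (d : Int) (hd : 0 ≤ d) (page : List String) :
    ∀ (s : PySem.Set Char) (r a : Bool), s.Nodup →
      r = !s.isEmpty → a = decide (∀ c ∈ s, c = ' ') →
      (page.foldl (fun e l => pvBStep l e) (d, r, a)).1 = d ∧
      ((page.foldl (fun e l => pvBStep l e) (d, r, a)).2.1
          = !(page.foldl (fun s l =>
            if PySem.Str.len l ≤ d then s
            else match PySem.Str.pyGet? l d with
              | some c => PySem.Set.add s c
              | none => s) s).isEmpty) ∧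
      ((page.foldl (fun e l => pvBStep l e) (d, r, a)).2.2
          = decide (∀ c ∈ (page.foldl (fun s l =>
            if PySem.Str.len l ≤ d then s
            else match PySem.Str.pyGet? l d with
              | some c => PySem.Set.add s c
              | none => s) s), c = ' ')) ∧
      (page.foldl (fun s l =>
            if PySem.Str.len l ≤ d then s
            else match PySem.Str.pyGet? l d with
              | some c => PySem.Set.add s c
              | none => s) s).Nodup := by
  induction page with
  | nil =>
    intro s r a hnd hr ha
    simpa using ⟨hr, ha, hnd⟩
  | cons l page ih =>
    intro s r a hnd hr ha
    simp only [List.foldl_cons]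
    by_cases h : PySem.Str.len l ≤ d
    · have h' : ¬ d < (l.length : Int) := by
        simpa [PySem.Str.len_eq] using not_lt.mpr h
      have hstep : pvBStep l (d, r, a) = (d, r, a) := by
        simp [pvBStep, h']
      have hA : (if PySem.Str.len l ≤ d then s
          else match PySem.Str.pyGet? l d with
            | some c => PySem.Set.add s c
            | none => s) = s := if_pos h
      simp only [hA, hstep]
      exact ih s r a hnd hr ha
    · have hlt : d < (l.length : Int) := by
        simpa [PySem.Str.len_eq] using lt_of_not_ge h
      have hlen : d.toNat < l.toList.length := by
        have h3 : l.toList.length = l.length := String.length_toList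
        omega
      have hget : PySem.Str.pyGet? l d = some l.toList[d.toNat] := pv_get l d hd hlen
      set c := l.toList[d.toNat] with hc
      have hget' : PySem.List.pyGet? l.toList d = some c := by
        simpa [PySem.Str.pyGet?_eq] using hget
      have hstep : pvBStep l (d, r, a) = (d, true, a && decide (c = ' ')) := by
        simp [pvBStep, hlt, hget', PySem.Str.len_eq]
      have hA : (if PySem.Str.len l ≤ d then s
          else match PySem.Str.pyGet? l d with
            | some c => PySem.Set.add s c
            | none => s) = PySem.Set.add s c := by
        rw [if_neg h, hget]
      simp only [hA, hstep]
      refine ih (PySem.Set.add s c) true (a && decide (c = ' ')) (PySem.Set.nodup_add _ c hnd) ?_ ?_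
      · have hne : PySem.Set.add s c ≠ [] := by
          rw [PySem.Set.add_eq_ite]
          split
          · rename_i hmem
            exact fun he => (by simp [he] at hmem)
          · simp
        rw [List.isEmpty_eq_false_iff.mpr hne, Bool.not_false]
      · rw [ha, ← Bool.decide_and]
        refine decide_eq_decide.mpr ?_
        constructor
        · rintro ⟨hs, hcsp⟩ x hx
          rcases (PySem.Set.mem_add _ _ _).mp hx with hm | hm
          · exact hs x hm
          · exact hm ▸ hcsp
        · intro hall
          exact ⟨fun x hx => hall x ((PySem.Set.mem_add _ _ _).mpr (Or.inl hx)),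
            hall c ((PySem.Set.mem_add _ _ _).mpr (Or.inr rfl))⟩

-- the final per-column condition: A's set test equals B's pair of flags
theorem pv_cond (s : PySem.Set Char) (hnd : s.Nodup) :
    ((PySem.Set.len s = 1 ∧ PySem.Set.contains s ' ') ↔ (s ≠ [] ∧ ∀ c ∈ s, c = ' ')) := by
  constructor
  · rintro ⟨h1, h2⟩
    have hmem : ' ' ∈ s := by
      rw [PySem.Set.contains] at h2
      simpa using h2
    have hlen : s.length = 1 := by
      simp [PySem.Set.len] at h1
      omega
    obtain ⟨x, hx⟩ := List.length_eq_one_iff.mp hlen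
    subst hx
    obtain rfl : x = ' ' := (List.mem_singleton.mp hmem).symm
    exact ⟨by simp, by simp⟩
  · rintro ⟨h1, h2⟩
    obtain ⟨x, rest, hx⟩ := List.exists_cons_of_ne_nil h1
    have hxsp : x = ' ' := h2 x (by simp [hx])
    have hrest : rest = [] := by
      by_contra hne
      obtain ⟨y, rest', hy⟩ := List.exists_cons_of_ne_nil hne
      have hysp : y = ' ' := h2 y (by simp [hx, hy])
      have hnd' : s.Nodup := hnd
      rw [hx, hy, hxsp, hysp] at hnd'
      simp at hnd'
    subst hrest
    rw [hx, hxsp]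
    exact ⟨by simp [PySem.Set.len], by simp [PySem.Set.contains]⟩

-- scanning the mapped columns equals A's outer early-return loop
theorem pv_scan (page : List String) :
    ∀ (ds : List Int), (∀ d ∈ ds, 0 ≤ d) →
      pvBScan (ds.map (fun d => page.foldl (fun e l => pvBStep l e) (d, false, true)))
        = pvAGo page ds := by
  intro ds
  induction ds with
  | nil => intro _; rfl
  | cons d ds ih =>
    intro hpos
    have hd : (0:Int) ≤ d := hpos d (by simp)
    obtain ⟨h1, h2, h3, hnd⟩ :=
      pv_col_inv d hd page PySem.Set.empty false true (by simp [PySem.Set.empty])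
        (by rfl) (by simp [PySem.Set.empty])
    have hA : (page.foldl (fun s l =>
        if PySem.Str.len l ≤ d then s
        else match PySem.Str.pyGet? l d with
          | some c => PySem.Set.add s c
          | none => s) PySem.Set.empty) = pvAInner page d := rfl
    rw [hA] at h2 h3 hnd
    simp only [List.map_cons, pvBScan, pvAGo]
    rw [h1, h2, h3]
    have hcond := pv_cond (pvAInner page d) hnd
    by_cases hc : PySem.Set.len (pvAInner page d) = 1 ∧ PySem.Set.contains (pvAInner page d) ' '
    · obtain ⟨hne, hall⟩ := hcond.mp hc
      have hb : (!(pvAInner page d).isEmpty && decide (∀ c ∈ pvAInner page d, c = ' ')) = true := by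
        rw [List.isEmpty_eq_false_iff.mpr hne, Bool.not_false, Bool.true_and, decide_eq_true_eq]
        exact hall
      rw [hb, if_pos hc]
      simp
    · have hb : (!(pvAInner page d).isEmpty && decide (∀ c ∈ pvAInner page d, c = ' ')) = false := by
        rcases Bool.eq_false_or_eq_true
            (!(pvAInner page d).isEmpty && decide (∀ c ∈ pvAInner page d, c = ' ')) with hT | hF
        swap
        · exact hF
        · exfalso
          rw [Bool.and_eq_true, Bool.not_eq_true', decide_eq_true_eq] at hT
          exact hc (hcond.mpr ⟨List.isEmpty_eq_false_iff.mp hT.1, hT.2⟩)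
      rw [hb, if_neg hc]
      simp only [Bool.false_eq_true, if_false]
      exact ih (fun x hx => hpos x (by simp [hx]))

-- ===== VERDICT (by name: the statement is the Claim_ definition above) =====
theorem findColumnGap_spec : Claim_equal_findColumnGap := by
  intro page _
  unfold Spec_findColumnGap
  simp only [findColumnGap, findColumnGap_alt]
  rw [pv_fold_map, List.map_map]
  rw [show ((fun e => page.foldl (fun e l => pvBStep l e) e) ∘ fun col => (col, false, true))
      = fun d => page.foldl (fun e l => pvBStep l e) ((d : Int), false, true) from rfl]
  rw [pv_scan page _ (fun d hd => by
    have := (PySem.List.mem_pyRange_one).mp hd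
    omega)]
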